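-- pv_equiv track=rewrite | github.com/Commit2Cosmos/MetaHackerCupSolutions | 2022/Qualification/A_SecondHands.py | solve
-- ===== SOURCE A (Python) =====
-- def solve(n, k, parts) -> bool:
--
--     if 2*k < n:
--         return False
--
--
--     s1, s2 = set(), set()
--
--     for p in parts:
--         if p in s1:
--             if p in s2:
--                 return False
--             s2.add(p)
--         else:
--             s1.add(p)
--
--     return True
-- ===== SOURCE B (Python) =====
-- def solve(n, k, parts) -> bool:
--     if 2 * k < n:
--         return False
--     s = sorted(parts)
--     return all(a != c for a, c in zip(s, s[2:]))
-- ===== Notes on version B (the rewrite author's own statement) =====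
-- stated objective: alternative
-- what changed: Replaces A's single-pass two-set scan with sort-then-scan: sort the parts once, then check no element equals the element two positions later (in a sorted list this holds iff every value occurs at most twice); trades A's O(n) hashing pass for an O(n log n) sort plus adjacent-window scan with no auxiliary sets.
import Mathlib
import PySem

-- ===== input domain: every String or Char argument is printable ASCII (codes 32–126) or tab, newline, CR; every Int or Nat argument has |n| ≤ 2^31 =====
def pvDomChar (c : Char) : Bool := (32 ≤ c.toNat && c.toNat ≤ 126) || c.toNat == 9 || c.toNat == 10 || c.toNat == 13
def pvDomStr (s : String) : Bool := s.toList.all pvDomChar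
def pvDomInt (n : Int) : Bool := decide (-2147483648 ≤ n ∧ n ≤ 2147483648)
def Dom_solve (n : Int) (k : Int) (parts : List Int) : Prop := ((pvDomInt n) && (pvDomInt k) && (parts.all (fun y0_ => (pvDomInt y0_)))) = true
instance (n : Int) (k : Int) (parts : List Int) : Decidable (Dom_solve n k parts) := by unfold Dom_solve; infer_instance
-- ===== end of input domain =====

-- B sorts the parts and checks that no element equals the one two positions
-- later (sort-then-scan), instead of A's single-pass two-set scan; objective:
-- alternative algorithm, same return value everywhere.

-- ===== PORT A =====
def solveLoop (s1 s2 : PySem.Set Int) : List Int → Bool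
  | [] => true
  | p :: ps =>
    if PySem.Set.contains s1 p then
      if PySem.Set.contains s2 p then false
      else solveLoop s1 (PySem.Set.add s2 p) ps
    else solveLoop (PySem.Set.add s1 p) s2 ps

def solve (n : Int) (k : Int) (parts : List Int) : Bool :=
  if 2 * k < n then false
  else solveLoop PySem.Set.empty PySem.Set.empty parts

-- ===== PORT B =====
def solve_alt (n : Int) (k : Int) (parts : List Int) : Bool :=
  if 2 * k < n then false
  else
    ((PySem.List.sorted parts (fun x => x)).zip
      (PySem.List.slice (PySem.List.sorted parts (fun x => x)) (some 2) none)).all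
      (fun ac => ac.1 != ac.2)

-- ===== PRECONDITION & SPEC =====
def Spec_solve (n : Int) (k : Int) (parts : List Int) (out : Bool) : Prop := out = solve_alt n k parts
instance (n : Int) (k : Int) (parts : List Int) (out : Bool) : Decidable (Spec_solve n k parts out) := by unfold Spec_solve; infer_instance

-- ===== CLAIM (what is proved, stated in full; the proofs are below) =====
def Claim_equal_solve : Prop := ∀ (n : Int) (k : Int) (parts : List Int), Dom_solve n k parts → Spec_solve n k parts (solve n k parts)

-- ===== LEMMAS AND PROOFS =====

/-- weight contributed by the two sets of A's loop -/
def pvW (s1 s2 : PySem.Set Int) (x : Int) : Nat :=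
  (if x ∈ s1 then 1 else 0) + (if x ∈ s2 then 1 else 0)

lemma contains_eq (s : PySem.Set Int) (x : Int) :
    PySem.Set.contains s x = decide (x ∈ s) := by
  simp [PySem.Set.contains]

/-- generic step of the loop invariant: bumping the weight of the head by one -/
lemma step_iff (p : Int) (ps : List Int) (w w' : Int → Nat)
    (hwp : w' p = w p + 1) (hw : ∀ x, x ≠ p → w' x = w x) (hle : w p + 1 ≤ 2) :
    ((∀ x ∈ ps, ps.count x + w' x ≤ 2) ↔ (∀ x ∈ p :: ps, (p :: ps).count x + w x ≤ 2)) := by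
  constructor
  · intro h x hx
    rcases List.mem_cons.mp hx with rfl | hx'
    · rw [List.count_cons_self]
      by_cases hp : x ∈ ps
      · have := h x hp; rw [hwp] at this; omega
      · rw [List.count_eq_zero_of_not_mem hp]; omega
    · by_cases hxp : x = p
      · subst hxp
        have := h x hx'; rw [hwp] at this; rw [List.count_cons_self]; omega
      · have := h x hx'; rw [hw x hxp] at this
        rw [List.count_cons_of_ne (Ne.symm hxp)]; omega
  · intro h x hx
    by_cases hxp : x = p
    · subst hxp
      have := h x (List.mem_cons_self ..)
      rw [List.count_cons_self] at this; rw [hwp]; omega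
    · have := h x (List.mem_cons_of_mem _ hx)
      rw [List.count_cons_of_ne (Ne.symm hxp)] at this; rw [hw x hxp]; omega

/-- characterisation of A's loop: it returns True iff every value's count plus
    its current weight in the two sets stays ≤ 2 -/
lemma solveLoop_char (rest : List Int) : ∀ s1 s2 : PySem.Set Int,
    (solveLoop s1 s2 rest = true ↔ ∀ x ∈ rest, rest.count x + pvW s1 s2 x ≤ 2) := by
  induction rest with
  | nil => simp [solveLoop]
  | cons p ps ih =>
    intro s1 s2
    by_cases h1 : p ∈ s1
    · by_cases h2 : p ∈ s2
      · simp only [solveLoop, contains_eq, h1, h2, decide_true, if_true,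
          Bool.false_eq_true, false_iff]
        intro h
        have := h p (List.mem_cons_self ..)
        rw [List.count_cons_self] at this
        simp [pvW, h1, h2] at this
      · simp only [solveLoop, contains_eq, h1, h2, decide_true, decide_false,
          Bool.false_eq_true, if_true, if_false, ih]
        refine step_iff p ps (pvW s1 s2) (pvW s1 (PySem.Set.add s2 p)) ?_ ?_ ?_
        · simp [pvW, h1, h2]
        · intro x hxp; simp [pvW, PySem.Set.mem_add, hxp]
        · simp [pvW, h1, h2]
    · simp only [solveLoop, contains_eq, h1, decide_false, Bool.false_eq_true, if_false, ih]
      refine step_iff p ps (pvW s1 s2) (pvW (PySem.Set.add s1 p) s2) ?_ ?_ ?_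
      · simp [pvW, h1]; split_ifs <;> omega
      · intro x hxp; simp [pvW, PySem.Set.mem_add, hxp]
      · simp [pvW, h1]; split_ifs <;> omega

/-- B's zipped scan as an index statement: every window of width 3 has distinct ends -/
lemma zip_all_iff (s : List Int) :
    ((s.zip (s.drop 2)).all (fun ac => ac.1 != ac.2) = true) ↔
      ∀ i : Nat, (h : i + 2 < s.length) → s[i] ≠ s[i + 2] := by
  rw [List.all_eq_true]
  constructor
  · intro h i hi
    have hlen : i < (s.zip (s.drop 2)).length := by
      simp only [List.length_zip, List.length_drop]; omega
    have := h _ (List.getElem_mem hlen)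
    rw [List.getElem_zip] at this
    simp only [List.getElem_drop, bne_iff_ne, ne_eq] at this
    simp only [Nat.add_comm 2 i] at this
    exact this
  · intro h ac hac
    obtain ⟨i, hi, rfl⟩ := List.getElem_of_mem hac
    rw [List.getElem_zip]
    have hi' : i + 2 < s.length := by
      simp only [List.length_zip, List.length_drop] at hi; omega
    simp only [List.getElem_drop, bne_iff_ne, ne_eq]
    simp only [Nat.add_comm 2 i]
    exact h i hi'

/-- on the sorted list, "no window of width 3 has equal ends" says exactly
    "every value occurs at most twice in parts" -/
lemma sorted_windows_iff (parts : List Int) :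
    (∀ i : Nat, (h : i + 2 < (PySem.List.sorted parts (fun x => x)).length) →
        (PySem.List.sorted parts (fun x => x))[i] ≠ (PySem.List.sorted parts (fun x => x))[i + 2]) ↔
      ∀ x : Int, parts.count x ≤ 2 := by
  have hperm : (PySem.List.sorted parts (fun x => x)).Perm parts :=
    PySem.List.sorted_perm parts (fun x => x) false
  have hcnt : ∀ x : Int, (PySem.List.sorted parts (fun x => x)).count x = parts.count x :=
    fun x => hperm.count_eq x
  constructor
  · intro h x
    by_contra hc
    rw [not_le] at hc
    have h3 : (List.replicate 3 x).Sublist (PySem.List.sorted parts (fun x => x)) :=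
      List.replicate_sublist_iff.mpr (by rw [hcnt]; omega)
    obtain ⟨is, his, hpw⟩ := List.sublist_eq_map_getElem h3
    have hlen3 : is.length = 3 := by simpa using congrArg List.length his.symm
    rcases is with _ | ⟨a, _ | ⟨b, _ | ⟨c, _ | ⟨d, rest⟩⟩⟩⟩ <;> simp at hlen3
    · simp only [List.map_cons, List.map_nil, List.replicate, List.cons.injEq] at his
      obtain ⟨ha, hb, hc', -⟩ := his
      simp only [Fin.getElem_fin] at ha hb hc'
      have hab : (a : Nat) < b := by
        have := (List.pairwise_cons.mp hpw).1 b (by simp)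
        exact_mod_cast this
      have hbc : (b : Nat) < c := by
        have := (List.pairwise_cons.mp ((List.pairwise_cons.mp hpw).2)).1 c (by simp)
        exact_mod_cast this
      have hclen : (c : Nat) < (PySem.List.sorted parts (fun x => x)).length := c.isLt
      have hlen : (a : Nat) + 2 < (PySem.List.sorted parts (fun x => x)).length := by omega
      have h1 : (PySem.List.sorted parts (fun x => x))[(a : Nat)] ≤
          (PySem.List.sorted parts (fun x => x))[(a : Nat) + 2] :=
        PySem.List.sorted_id_getElem_mono _ (by omega) hlen
      have h2 : (PySem.List.sorted parts (fun x => x))[(a : Nat) + 2] ≤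
          (PySem.List.sorted parts (fun x => x))[(c : Nat)] :=
        PySem.List.sorted_id_getElem_mono _ (by omega) hclen
      have hac : (PySem.List.sorted parts (fun x => x))[(a : Nat)] =
          (PySem.List.sorted parts (fun x => x))[(a : Nat) + 2] := by
        have : (PySem.List.sorted parts (fun x => x))[(a : Nat)] =
            (PySem.List.sorted parts (fun x => x))[(c : Nat)] := by
          rw [← ha, ← hc']
        omega
      exact h (a : Nat) hlen hac
  · intro h i hi heq
    have h1 : i < (PySem.List.sorted parts (fun x => x)).length := by omega
    have h2 : i + 1 < (PySem.List.sorted parts (fun x => x)).length := by omega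
    have hd1 := List.getElem_cons_drop h1
    have hd2 := List.getElem_cons_drop h2
    have hd3 := List.getElem_cons_drop hi
    have hd : (PySem.List.sorted parts (fun x => x)).drop i =
        (PySem.List.sorted parts (fun x => x))[i] ::
        (PySem.List.sorted parts (fun x => x))[i + 1] ::
        (PySem.List.sorted parts (fun x => x))[i + 2] ::
        (PySem.List.sorted parts (fun x => x)).drop (i + 3) := by
      rw [← hd1, ← hd2, ← hd3]
    have hmid : (PySem.List.sorted parts (fun x => x))[i + 1] =
        (PySem.List.sorted parts (fun x => x))[i] := by
      have hlo : (PySem.List.sorted parts (fun x => x))[i] ≤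
          (PySem.List.sorted parts (fun x => x))[i + 1] :=
        PySem.List.sorted_id_getElem_mono _ (by omega) h2
      have hhi : (PySem.List.sorted parts (fun x => x))[i + 1] ≤
          (PySem.List.sorted parts (fun x => x))[i + 2] :=
        PySem.List.sorted_id_getElem_mono _ (by omega) hi
      omega
    have hc3 : 3 ≤ ((PySem.List.sorted parts (fun x => x)).drop i).count
        ((PySem.List.sorted parts (fun x => x))[i]) := by
      rw [hd]
      simp [hmid, ← heq]
    have hsub : ((PySem.List.sorted parts (fun x => x)).drop i).Sublist
        (PySem.List.sorted parts (fun x => x)) := List.drop_sublist ..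
    have := hsub.count_le ((PySem.List.sorted parts (fun x => x))[i])
    have := h ((PySem.List.sorted parts (fun x => x))[i])
    rw [← hcnt] at this
    omega

-- ===== VERDICT (by name: the statement is the Claim_ definition above) =====
theorem solve_spec : Claim_equal_solve := by
  intro n k parts _
  unfold Spec_solve solve solve_alt
  by_cases hk : 2 * k < n
  · simp [hk]
  · rw [if_neg hk, if_neg hk]
    show solveLoop PySem.Set.empty PySem.Set.empty parts = _
    rw [PySem.List.slice_from _ (by norm_num : (0:Int) ≤ 2)]
    rw [show ((2:Int).toNat) = 2 from rfl]
    rw [Bool.eq_iff_iff, solveLoop_char, zip_all_iff, sorted_windows_iff]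
    constructor
    · intro h x
      by_cases hx : x ∈ parts
      · have := h x hx
        simp [pvW, PySem.Set.empty] at this
        omega
      · rw [List.count_eq_zero_of_not_mem hx]; omega
    · intro h x hx
      have := h x
      simp [pvW, PySem.Set.empty]
      omega
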